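-- pv_equiv track=rewrite | github.com/josembar/ci-pipeline-python-travisci | convert.py | validate_octet
-- ===== SOURCE A (Python) =====
-- def validate_octet(val):
--     n=255
--     if int(val) == n:
--         return True
--     else:
--         for i in range(0,8):
--             n-=2**i
--             if int(val) == n:
--                 return True
--         return False
-- ===== SOURCE B (Python) =====
-- def validate_octet(val):
--     n = int(val)
--     return 0 <= n <= 255 and (255 - n) & (256 - n) == 0
-- ===== Notes on version B (the rewrite author's own statement) =====
-- stated objective: idiomatic
-- what changed: Replaces A's descending-subtraction loop over powers of two by a closed-form bit test: n is a valid netmask octet iff 0 <= n <= 255 and (255-n)&(256-n) == 0 (255-n is of the form 2^k-1).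
import Mathlib
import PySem

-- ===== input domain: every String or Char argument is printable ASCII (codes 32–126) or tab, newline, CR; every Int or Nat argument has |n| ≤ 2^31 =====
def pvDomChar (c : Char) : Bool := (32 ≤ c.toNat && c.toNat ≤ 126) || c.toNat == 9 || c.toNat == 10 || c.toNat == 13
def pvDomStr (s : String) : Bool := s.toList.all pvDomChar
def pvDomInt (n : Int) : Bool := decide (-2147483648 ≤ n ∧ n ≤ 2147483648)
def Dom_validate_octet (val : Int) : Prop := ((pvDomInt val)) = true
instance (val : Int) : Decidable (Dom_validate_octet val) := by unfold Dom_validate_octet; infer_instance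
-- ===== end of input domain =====

-- ===== PORT A =====
-- B replaces A's descending-subtraction loop by the closed-form netmask-octet bit test (idiomatic).
-- A: n=255; if val==n: True; else: for i in range(0,8): n -= 2**i; if val==n: True; else False
-- early return modelled by an Option Bool carried through the fold
def validate_octet (val : Int) : Bool :=
  if val == 255 then true
  else
    let r := (PySem.List.pyRange 0 8 1).foldl
      (fun (s : Option Bool × Int) i =>
        match s.1 with
        | some _ => s
        | none =>
          let n := s.2 - 2 ^ i.toNat
          (if val == n then some true else none, n))
      (none, 255)
    r.1.getD false

-- ===== PORT B =====
-- return 0 <= n <= 255 and (255 - n) & (256 - n) == 0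
def validate_octet_alt (val : Int) : Bool :=
  (0 ≤ val && val ≤ 255) && (Int.land (255 - val) (256 - val) == 0)

-- ===== PRECONDITION & SPEC =====
def Spec_validate_octet (val : Int) (out : Bool) : Prop := out = validate_octet_alt val
instance (val : Int) (out : Bool) : Decidable (Spec_validate_octet val out) := by unfold Spec_validate_octet; infer_instance

-- ===== CLAIM (what is proved, stated in full; the proofs are below) =====
def Claim_equal_validate_octet : Prop := ∀ (val : Int), Dom_validate_octet val → Spec_validate_octet val (validate_octet val)

-- ===== LEMMAS AND PROOFS =====

-- ===== VERDICT (by name: the statement is the Claim_ definition above) =====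
theorem validate_octet_agree (val : Int) : validate_octet val = validate_octet_alt val := by
  by_cases h : 0 ≤ val ∧ val ≤ 255
  · obtain ⟨h1, h2⟩ := h
    interval_cases val <;> decide
  · have h255 : ¬ val = 255 := by omega
    have h254 : ¬ val = 254 := by omega
    have h252 : ¬ val = 252 := by omega
    have h248 : ¬ val = 248 := by omega
    have h240 : ¬ val = 240 := by omega
    have h224 : ¬ val = 224 := by omega
    have h192 : ¬ val = 192 := by omega
    have h128 : ¬ val = 128 := by omega
    have h0 : ¬ val = 0 := by omega
    have hA : validate_octet val = false := by
      simp only [validate_octet]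
      rw [show PySem.List.pyRange 0 8 1 = [0,1,2,3,4,5,6,7] from by decide]
      norm_num [List.foldl_cons, List.foldl_nil, show Int.toNat 0 = 0 from rfl, show Int.toNat 1 = 1 from rfl, show Int.toNat 2 = 2 from rfl, show Int.toNat 3 = 3 from rfl, show Int.toNat 4 = 4 from rfl, show Int.toNat 5 = 5 from rfl, show Int.toNat 6 = 6 from rfl, show Int.toNat 7 = 7 from rfl, h255, h254, h252, h248, h240, h224, h192, h128, h0]
    have hB : validate_octet_alt val = false := by
      simp only [validate_octet_alt, Bool.and_eq_false_iff, decide_eq_false_iff_not]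
      omega
    rw [hA, hB]

theorem validate_octet_spec : Claim_equal_validate_octet := by
  intro val _
  exact validate_octet_agree val
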